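-- pv_equiv track=rewrite | github.com/luofengyi/VEGA | tools/make_table.py | build_ablation_rows
-- ===== SOURCE A (Python) =====
-- from typing import Dict, List, Optional, Tuple
--
-- EXPERIMENT_ORDER = [
--     "full_vega",
--     "wo_vega_branch",
--     "wo_stochastic_anchor_sampling",
--     "wo_unimodal_anchoring",
--     "wo_multimodal_anchoring",
--     "wo_self_distillation_in_vega",
-- ]
--
-- def build_ablation_rows(data: Dict[str, dict]) -> List[dict]:
--     rows: List[dict] = []
--     for key in EXPERIMENT_ORDER:
--         if key in data:
--             rows.append(data[key])
--     for key in data: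
--         if key not in EXPERIMENT_ORDER:
--             rows.append(data[key])
--     return rows
-- ===== SOURCE B (Python) =====
-- EXPERIMENT_ORDER = [
--     "full_vega",
--     "wo_vega_branch",
--     "wo_stochastic_anchor_sampling",
--     "wo_unimodal_anchoring",
--     "wo_multimodal_anchoring",
--     "wo_self_distillation_in_vega",
-- ]
--
-- def build_ablation_rows(data):
--     n = len(EXPERIMENT_ORDER)
--     rank = {key: i for i, key in enumerate(EXPERIMENT_ORDER)}
--     items = [(rank.get(key, n), value) for key, value in data.items()]
--     buckets = {}
--     for i, value in items:
--         buckets.setdefault(i, []).append(value)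
--     return [row for i in range(n + 1) for row in buckets.get(i, [])]
-- ===== Notes on version B (the rewrite author's own statement) =====
-- stated objective: alternative
-- what changed: Replaces A's two scans (one over EXPERIMENT_ORDER with a dict membership+lookup per key, one over the dict) by a rank dict built once and a single pass over the dict that drops each value into one of 7 buckets, then concatenates the buckets.
import Mathlib
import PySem

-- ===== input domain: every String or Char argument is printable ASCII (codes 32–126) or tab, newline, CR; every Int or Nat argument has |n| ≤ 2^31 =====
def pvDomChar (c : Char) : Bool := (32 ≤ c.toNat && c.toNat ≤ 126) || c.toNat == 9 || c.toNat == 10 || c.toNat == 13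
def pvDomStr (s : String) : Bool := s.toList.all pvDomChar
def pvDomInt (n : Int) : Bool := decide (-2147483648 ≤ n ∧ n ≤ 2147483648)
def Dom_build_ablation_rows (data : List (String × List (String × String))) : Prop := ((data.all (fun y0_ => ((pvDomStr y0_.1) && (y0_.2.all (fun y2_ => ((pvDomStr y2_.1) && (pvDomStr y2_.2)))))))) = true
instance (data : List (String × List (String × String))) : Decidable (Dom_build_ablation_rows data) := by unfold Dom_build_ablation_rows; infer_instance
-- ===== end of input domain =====

-- B replaces A's two scans (one over EXPERIMENT_ORDER with a per-key dict lookup, one over the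
-- dict) by a rank dict and one pass over the dict into rank-keyed buckets that are then read
-- out in rank order; equal output is proved for dict inputs (association lists with distinct keys).

def EXPERIMENT_ORDER : List String :=
  ["full_vega", "wo_vega_branch", "wo_stochastic_anchor_sampling",
   "wo_unimodal_anchoring", "wo_multimodal_anchoring", "wo_self_distillation_in_vega"]

-- ===== PORT A =====
-- 'key in data' / 'data[key]' on the dict = contains / getD on the association list (the getD
-- default is never used: the lookup is guarded by the membership test).
def build_ablation_rows (data : List (String × List (String × String))) : List (List (String × String)) :=
  let d := PySem.Dict.mk data
  let rows := EXPERIMENT_ORDER.foldl (fun rows key =>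
    if d.contains key then rows ++ [d.getD key []] else rows) []
  data.foldl (fun rows kv => if EXPERIMENT_ORDER.contains kv.1 then rows else rows ++ [kv.2]) rows

-- ===== PORT B =====
-- rank = {key: i for i, key in enumerate(EXPERIMENT_ORDER)}; buckets.setdefault(i, []).append(v)
-- is Dict.modify i [] (· ++ [v]); the final comprehension over range(n + 1) is flatMap.
def build_ablation_rows_alt (data : List (String × List (String × String))) : List (List (String × String)) :=
  let n : Int := (EXPERIMENT_ORDER.length : Int)
  let rank : PySem.Dict String Int :=
    (PySem.List.enumerate EXPERIMENT_ORDER).foldl (fun d p => d.insert p.2 p.1) PySem.Dict.empty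
  let items : List (Int × List (String × String)) := data.map (fun kv => (rank.getD kv.1 n, kv.2))
  let buckets : PySem.Dict Int (List (List (String × String))) :=
    items.foldl (fun d p => d.modify p.1 [] (· ++ [p.2])) PySem.Dict.empty
  (PySem.List.pyRange 0 (n + 1) 1).flatMap (fun i => buckets.getD i [])

-- ===== PRECONDITION & SPEC =====
-- Pre_ admits exactly the association lists that represent a Python dict (distinct keys);
-- a duplicate-key list corresponds to no input of either Python program.
def Pre_build_ablation_rows (data : List (String × List (String × String))) : Prop :=
  (data.map Prod.fst).Nodup
instance (data : List (String × List (String × String))) : Decidable (Pre_build_ablation_rows data) := by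
  unfold Pre_build_ablation_rows; infer_instance

def pvWitness_build_ablation_rows : (List (String × List (String × String))) :=
  [("wo_vega_branch", [("acc", "1")]), ("extra", []), ("full_vega", [("acc", "2")])]

def Spec_build_ablation_rows (data : List (String × List (String × String))) (out : List (List (String × String))) : Prop := out = build_ablation_rows_alt data
instance (data : List (String × List (String × String))) (out : List (List (String × String))) : Decidable (Spec_build_ablation_rows data out) := by unfold Spec_build_ablation_rows; infer_instance

-- ===== CLAIM (what is proved, stated in full; the proofs are below) =====
def Claim_equal_build_ablation_rows : Prop := ∀ (data : List (String × List (String × String))), Dom_build_ablation_rows data → Pre_build_ablation_rows data → Spec_build_ablation_rows data (build_ablation_rows data)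

-- ===== LEMMAS AND PROOFS =====

-- the bucket index of a key, as a plain function
def rankIdx (k : String) : Int :=
  if k = "full_vega" then 0
  else if k = "wo_vega_branch" then 1
  else if k = "wo_stochastic_anchor_sampling" then 2
  else if k = "wo_unimodal_anchoring" then 3
  else if k = "wo_multimodal_anchoring" then 4
  else if k = "wo_self_distillation_in_vega" then 5
  else 6

-- one bucket's final content, as a filter of the input
def bucketF (data : List (String × List (String × String))) (j : Int) : List (List (String × String)) :=
  (data.filter (fun kv => rankIdx kv.1 == j)).map (fun kv => kv.2)

-- A's per-key contribution in the first loop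
def optV (data : List (String × List (String × String))) (key : String) : List (List (String × String)) :=
  match (PySem.Dict.mk data).get? key with
  | some v => [v]
  | none => []

lemma rank_getD (k : String) :
    (((PySem.List.enumerate EXPERIMENT_ORDER).foldl
        (fun d p => d.insert p.2 p.1) (PySem.Dict.empty : PySem.Dict String Int)).getD k
        ((EXPERIMENT_ORDER.length : Int))) = rankIdx k := by
  rw [show ((PySem.List.enumerate EXPERIMENT_ORDER).foldl
        (fun d p => d.insert p.2 p.1) (PySem.Dict.empty : PySem.Dict String Int))
      = PySem.Dict.mk [("full_vega", 0), ("wo_vega_branch", 1), ("wo_stochastic_anchor_sampling", 2),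
          ("wo_unimodal_anchoring", 3), ("wo_multimodal_anchoring", 4),
          ("wo_self_distillation_in_vega", 5)] from rfl]
  rw [show ((EXPERIMENT_ORDER.length : Int)) = 6 from rfl]
  rw [PySem.Dict.getD_eq_get?_getD]
  unfold rankIdx
  split_ifs with h1 h2 h3 h4 h5 h6
  · subst h1; rfl
  · subst h2; rfl
  · subst h3; rfl
  · subst h4; rfl
  · subst h5; rfl
  · subst h6; rfl
  · have hn : ∀ s : String, k ≠ s → (s == k) = false :=
      fun s hs => beq_eq_false_iff_ne.mpr (Ne.symm hs)
    simp [PySem.Dict.get?, hn _ h1, hn _ h2, hn _ h3, hn _ h4, hn _ h5, hn _ h6]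

lemma second_loop (data : List (String × List (String × String)))
    (init : List (List (String × String))) :
    data.foldl (fun rows kv => if EXPERIMENT_ORDER.contains kv.1 then rows else rows ++ [kv.2]) init
    = init ++ (data.filter (fun kv => !(EXPERIMENT_ORDER.contains kv.1))).map (fun kv => kv.2) := by
  have hfun : (fun (rows : List (List (String × String))) (kv : String × List (String × String)) =>
        if EXPERIMENT_ORDER.contains kv.1 then rows else rows ++ [kv.2])
      = (fun rows kv => if !(EXPERIMENT_ORDER.contains kv.1) then rows ++ [kv.2] else rows) :=
    funext fun rows => funext fun kv => by cases h : EXPERIMENT_ORDER.contains kv.1 <;> simp [h]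
  rw [hfun]
  exact PySem.List.foldl_append_if _ _ _ _

lemma a_eq (data : List (String × List (String × String))) :
    build_ablation_rows data
    = optV data "full_vega" ++ optV data "wo_vega_branch" ++ optV data "wo_stochastic_anchor_sampling"
      ++ optV data "wo_unimodal_anchoring" ++ optV data "wo_multimodal_anchoring"
      ++ optV data "wo_self_distillation_in_vega"
      ++ (data.filter (fun kv => !(EXPERIMENT_ORDER.contains kv.1))).map (fun kv => kv.2) := by
  show data.foldl (fun rows kv => if EXPERIMENT_ORDER.contains kv.1 then rows else rows ++ [kv.2])
      (EXPERIMENT_ORDER.foldl (fun rows key =>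
        if (PySem.Dict.mk data).contains key then rows ++ [(PySem.Dict.mk data).getD key []] else rows) []) = _
  rw [second_loop]
  have hstep : ∀ (rows : List (List (String × String))) (key : String),
      (if (PySem.Dict.mk data).contains key then rows ++ [(PySem.Dict.mk data).getD key []] else rows)
      = rows ++ optV data key := by
    intro rows key
    unfold optV
    rw [PySem.Dict.contains_eq_isSome_get?, PySem.Dict.getD_eq_get?_getD]
    cases (PySem.Dict.mk data).get? key <;> simp
  simp only [EXPERIMENT_ORDER, List.foldl_cons, List.foldl_nil, hstep]
  simp [List.append_assoc]

lemma alt_eq (data : List (String × List (String × String))) :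
    build_ablation_rows_alt data
    = bucketF data 0 ++ bucketF data 1 ++ bucketF data 2 ++ bucketF data 3
      ++ bucketF data 4 ++ bucketF data 5 ++ bucketF data 6 := by
  show (PySem.List.pyRange 0 ((EXPERIMENT_ORDER.length : Int) + 1) 1).flatMap
      (fun i => ((data.map (fun kv => (((PySem.List.enumerate EXPERIMENT_ORDER).foldl
            (fun d p => d.insert p.2 p.1) (PySem.Dict.empty : PySem.Dict String Int)).getD kv.1
            ((EXPERIMENT_ORDER.length : Int)), kv.2))).foldl
          (fun d p => d.modify p.1 [] (· ++ [p.2])) PySem.Dict.empty).getD i []) = _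
  rw [show PySem.List.pyRange 0 ((EXPERIMENT_ORDER.length : Int) + 1) 1 = ([0, 1, 2, 3, 4, 5, 6] : List Int) from rfl]
  simp only [List.flatMap_cons, List.flatMap_nil, List.append_nil]
  simp [PySem.Dict.getD_foldl_modify_append, PySem.Dict.getD_empty, List.filter_map,
        List.map_map, Function.comp_def, rank_getD, bucketF, List.append_assoc]

lemma filter_key_nodup (data : List (String × List (String × String))) :
    ∀ key : String, (data.map Prod.fst).Nodup →
    (data.filter (fun kv => kv.1 == key)).map (fun kv => kv.2) = optV data key := by
  induction data with
  | nil => intro key _; rfl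
  | cons kv rest ih =>
    intro key h
    obtain ⟨k, v⟩ := kv
    simp only [List.map_cons] at h
    have hnd := List.nodup_cons.mp h
    by_cases hk : k = key
    · subst hk
      have hfil : rest.filter (fun kv => kv.1 == k) = [] :=
        List.filter_eq_nil_iff.mpr (fun x hx => by
          simp only [beq_iff_eq]
          intro he
          exact hnd.1 (he ▸ List.mem_map_of_mem hx))
      simp [optV, hfil, PySem.Dict.get?_mk_cons]
    · have htail : (rest.map Prod.fst).Nodup := hnd.2
      have hne : (k == key) = false := by simp [hk]
      simpa [optV, List.filter_cons, hne, PySem.Dict.get?_mk_cons] using ih key htail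

lemma bucket_opt (data : List (String × List (String × String)))
    (hpre : (data.map Prod.fst).Nodup) (j : Int) (key : String)
    (e : ∀ s : String, (rankIdx s == j) = (s == key)) :
    bucketF data j = optV data key := by
  unfold bucketF
  rw [List.filter_congr (fun x _ => e x.1)]
  exact filter_key_nodup data key hpre

lemma bucket_rest (data : List (String × List (String × String))) :
    bucketF data 6 = (data.filter (fun kv => !(EXPERIMENT_ORDER.contains kv.1))).map (fun kv => kv.2) := by
  unfold bucketF
  rw [List.filter_congr (fun x _ => by
    show (rankIdx x.1 == (6 : Int)) = (!(EXPERIMENT_ORDER.contains x.1))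
    unfold rankIdx
    split_ifs <;> simp_all [EXPERIMENT_ORDER])]

theorem build_ablation_rows_spec : Claim_equal_build_ablation_rows := by
  intro data _ hpre
  unfold Spec_build_ablation_rows
  have e0 : ∀ s : String, (rankIdx s == (0 : Int)) = (s == "full_vega") := by
    intro s; unfold rankIdx; split_ifs <;> simp_all
  have e1 : ∀ s : String, (rankIdx s == (1 : Int)) = (s == "wo_vega_branch") := by
    intro s; unfold rankIdx; split_ifs <;> simp_all
  have e2 : ∀ s : String, (rankIdx s == (2 : Int)) = (s == "wo_stochastic_anchor_sampling") := by
    intro s; unfold rankIdx; split_ifs <;> simp_all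
  have e3 : ∀ s : String, (rankIdx s == (3 : Int)) = (s == "wo_unimodal_anchoring") := by
    intro s; unfold rankIdx; split_ifs <;> simp_all
  have e4 : ∀ s : String, (rankIdx s == (4 : Int)) = (s == "wo_multimodal_anchoring") := by
    intro s; unfold rankIdx; split_ifs <;> simp_all
  have e5 : ∀ s : String, (rankIdx s == (5 : Int)) = (s == "wo_self_distillation_in_vega") := by
    intro s; unfold rankIdx; split_ifs <;> simp_all
  rw [a_eq data, alt_eq data,
    bucket_opt data hpre 0 "full_vega" e0,
    bucket_opt data hpre 1 "wo_vega_branch" e1,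
    bucket_opt data hpre 2 "wo_stochastic_anchor_sampling" e2,
    bucket_opt data hpre 3 "wo_unimodal_anchoring" e3,
    bucket_opt data hpre 4 "wo_multimodal_anchoring" e4,
    bucket_opt data hpre 5 "wo_self_distillation_in_vega" e5,
    bucket_rest data]
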